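-- pv_equiv track=rewrite | github.com/lukaselmer/adventofcode | 2018/aoc/d5/main.py | _react_on
-- ===== SOURCE A (Python) =====
-- from typing import List
--
-- def _react_on(polymer: List[str]):
--     reacted = False
--     for index, _ in enumerate(polymer):
--         if index >= len(polymer) - 1:
--             break
--         if _can_react(polymer[index], polymer[index + 1]):
--             del polymer[index + 1]
--             del polymer[index]
--             reacted = True
--     return reacted
--
-- def _can_react(char_a: str, char_b: str):
--     return char_a != char_b and char_a.lower() == char_b.lower()
-- ===== SOURCE B (Python) =====
-- from typing import List
--
-- def _react_on(polymer: List[str]):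
--     # Stack-based scan; same return value as A. Note: both mutate
--     # polymer in place, but B fully reduces it in one pass (A removes only
--     # some pairs per pass); the equivalence proved is about the return value.
--     stack = []
--     for unit in polymer:
--         if stack and _can_react(stack[-1], unit):
--             stack.pop()
--         else:
--             stack.append(unit)
--     reacted = len(stack) != len(polymer)
--     polymer[:] = stack
--     return reacted
--
-- def _can_react(char_a: str, char_b: str):
--     return char_a != char_b and char_a.lower() == char_b.lower()
-- ===== Notes on version B (the rewrite author's own statement) =====
-- stated objective: alternative
-- what changed: A scans with a live index while deleting adjacent reacting pairs from the list in place (with skip-ahead iterator semantics); B does one stack-based scan and compares lengths; the return value is identical, while the in-place mutation differs (B fully reduces the polymer in one pass, same fixpoint).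
import Mathlib
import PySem

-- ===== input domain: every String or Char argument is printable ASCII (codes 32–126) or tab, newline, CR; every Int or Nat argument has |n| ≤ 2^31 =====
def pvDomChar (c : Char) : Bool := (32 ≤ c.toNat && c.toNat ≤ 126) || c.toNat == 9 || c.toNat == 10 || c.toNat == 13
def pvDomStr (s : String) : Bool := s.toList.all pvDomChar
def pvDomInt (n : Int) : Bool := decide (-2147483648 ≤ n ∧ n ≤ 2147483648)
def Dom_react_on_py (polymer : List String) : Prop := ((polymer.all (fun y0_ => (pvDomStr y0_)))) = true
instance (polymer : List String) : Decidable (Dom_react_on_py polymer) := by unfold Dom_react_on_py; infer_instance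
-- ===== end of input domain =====

-- B replaces A's delete-in-place index scan by one stack-based scan; the return value is
-- identical (proved below); the in-place MUTATION of polymer differs (B fully reduces the
-- polymer in one pass, A removes only some pairs) — the claim is about the return value.

-- ===== PORT A =====
-- _can_react, shared verbatim by both Pythons
def canReact (a b : String) : Bool :=
  (a != b) && (PySem.Str.lower a == PySem.Str.lower b)

-- A's for-loop over enumerate(polymer) while deleting from polymer: the live Python list
-- iterator advances its index by one each step over the CURRENT list; modelled as recursion
-- on (current list l, iterator index i, reacted flag).
def reactLoop (l : List String) (i : Nat) (reacted : Bool) : Bool :=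
  if hi : i < l.length then
    if hbrk : i ≥ l.length - 1 then reacted   -- break
    else
      have h1 : i + 1 < l.length := by omega
      if canReact l[i] l[i + 1] then
        reactLoop ((l.eraseIdx (i + 1)).eraseIdx i) (i + 1) true
      else
        reactLoop l (i + 1) reacted
  else reacted                                  -- iterator exhausted
termination_by l.length - i
decreasing_by
  · have h2 : (l.eraseIdx (i + 1)).length = l.length - 1 := List.length_eraseIdx_of_lt h1
    have h3 : ((l.eraseIdx (i + 1)).eraseIdx i).length = (l.eraseIdx (i + 1)).length - 1 :=
      List.length_eraseIdx_of_lt (by omega)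
    omega
  · omega

def react_on_py (polymer : List String) : Bool := reactLoop polymer 0 false

-- ===== PORT B =====
def stepB (st : List String) (c : String) : List String :=
  match st with
  | t :: rest => if canReact t c then rest else c :: t :: rest
  | [] => [c]

def react_on_py_alt (polymer : List String) : Bool :=
  let stack := polymer.foldl stepB []
  stack.length != polymer.length

-- ===== PRECONDITION & SPEC =====
def Spec_react_on_py (polymer : List String) (out : Bool) : Prop := out = react_on_py_alt polymer
instance (polymer : List String) (out : Bool) : Decidable (Spec_react_on_py polymer out) := by unfold Spec_react_on_py; infer_instance

-- ===== CLAIM (what is proved, stated in full; the proofs are below) =====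
def Claim_equal_react_on_py : Prop := ∀ (polymer : List String), Dom_react_on_py polymer → Spec_react_on_py polymer (react_on_py polymer)

-- ===== LEMMAS AND PROOFS =====

-- common characterisation: some adjacent pair reacts
def hasAdj : List String → Bool
  | a :: b :: rest => canReact a b || hasAdj (b :: rest)
  | _ => false

theorem hasAdj_of_short (l : List String) (h : l.length ≤ 1) : hasAdj l = false := by
  match l, h with
  | [], _ => rfl
  | [a], _ => rfl

theorem reactLoop_eq (l : List String) (i : Nat) (r : Bool) :
    reactLoop l i r = (r || hasAdj (l.drop i)) := by
  fun_induction reactLoop l i r with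
  | case1 l i r hi hbrk =>
    have h : hasAdj (l.drop i) = false := hasAdj_of_short _ (by simp; omega)
    simp [h]
  | case2 l i r hi hbrk h1 hc ih =>
    have hd : l.drop i = l[i] :: l.drop (i + 1) := List.drop_eq_getElem_cons hi
    have hd2 : l.drop (i + 1) = l[i + 1] :: l.drop (i + 2) := List.drop_eq_getElem_cons h1
    rw [ih, hd, hd2]
    simp [hasAdj, hc]
  | case3 l i r hi hbrk h1 hc ih =>
    have hd : l.drop i = l[i] :: l.drop (i + 1) := List.drop_eq_getElem_cons hi
    have hd2 : l.drop (i + 1) = l[i + 1] :: l.drop (i + 2) := List.drop_eq_getElem_cons h1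
    rw [ih, hd, hd2]
    simp [hasAdj, hc]
  | case4 l i r hi =>
    have : l.drop i = [] := List.drop_eq_nil_of_le (by omega)
    simp [this, hasAdj]

theorem stepB_len_le (st : List String) (c : String) : (stepB st c).length ≤ st.length + 1 := by
  match st with
  | [] => simp [stepB]
  | t :: r =>
    simp only [stepB]
    split
    · simp
      omega
    · simp

theorem foldB_no_react : ∀ (l st : List String), hasAdj l = false →
    (∀ t c, st.head? = some t → l.head? = some c → canReact t c = false) →
    l.foldl stepB st = l.reverse ++ st
  | [], st, _, _ => rfl
  | [a], st, _, htop => by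
    have hpush : stepB st a = a :: st := by
      match st with
      | [] => rfl
      | t :: r => simp [stepB, htop t a rfl rfl]
    simp [hpush]
  | a :: b :: rest, st, hadj, htop => by
    simp only [hasAdj, Bool.or_eq_false_iff] at hadj
    obtain ⟨hab, hrest⟩ := hadj
    have hpush : stepB st a = a :: st := by
      match st with
      | [] => rfl
      | t :: r => simp [stepB, htop t a rfl rfl]
    have := foldB_no_react (b :: rest) (a :: st) hrest
      (by intro t c ht hc; simp at ht hc; subst ht; subst hc; simpa using hab)
    simp only [List.foldl_cons, hpush, this]
    simp

theorem foldB_len_le (l : List String) : ∀ st : List String,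
    (l.foldl stepB st).length ≤ st.length + l.length := by
  induction l with
  | nil => simp
  | cons a rest ih =>
    intro st
    have h1 := ih (stepB st a)
    have h2 := stepB_len_le st a
    simp only [List.foldl_cons, List.length_cons]
    omega

theorem foldB_len_lt : ∀ (l : List String), hasAdj l = true →
    ∀ st : List String, (l.foldl stepB st).length < st.length + l.length
  | a :: b :: rest, hadj, st => by
    simp only [hasAdj, Bool.or_eq_true] at hadj
    by_cases hab : canReact a b = true
    · match st with
      | t :: r =>
        by_cases hta : canReact t a = true
        · -- a pops t, then whatever happens on b :: rest only loses or keeps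
          have h := foldB_len_le (b :: rest) r
          simp only [List.foldl_cons, stepB, if_pos hta] at *
          simp only [List.length_cons] at *
          omega
        · -- a is pushed, then b pops it
          have h := foldB_len_le rest (t :: r)
          simp only [List.foldl_cons, stepB, if_neg hta, if_pos hab] at *
          simp only [List.length_cons] at *
          omega
      | [] =>
        -- a is pushed onto the empty stack, then b pops it
        have h := foldB_len_le rest []
        simp only [List.foldl_cons, stepB, if_pos hab] at *
        simp only [List.length_cons, List.length_nil] at *
        omega
    · have hrest : hasAdj (b :: rest) = true := by tauto
      have hIH := foldB_len_lt (b :: rest) hrest (stepB st a)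
      have hlen := stepB_len_le st a
      simp only [List.foldl_cons, List.length_cons] at *
      omega
  | [], hadj, st => by simp [hasAdj] at hadj
  | [a], hadj, st => by simp [hasAdj] at hadj

theorem alt_eq_hasAdj (l : List String) : react_on_py_alt l = hasAdj l := by
  unfold react_on_py_alt
  by_cases h : hasAdj l = true
  · have hlt := foldB_len_lt l h []
    simp only [List.length_nil, Nat.zero_add] at hlt
    simp only [h, bne_iff_ne, ne_eq]
    omega
  · have hf : hasAdj l = false := by simpa using h
    have he := foldB_no_react l [] hf (by simp)
    simp [he, hf]

-- ===== VERDICT (by name: the statement is the Claim_ definition above) =====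
theorem react_on_py_spec : Claim_equal_react_on_py := by
  intro polymer _
  unfold Spec_react_on_py
  rw [alt_eq_hasAdj]
  unfold react_on_py
  rw [reactLoop_eq]
  simp
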